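-- pv_equiv track=rewrite | github.com/aneesh-srivastava-11/NPTEL-Python-DSA | week4assignment.py | setup_gradedict
-- ===== SOURCE A (Python) =====
-- def setup_gradedict(details):
--
--     dict = {}
--     for (rollno,ccode,grade) in details:
--         if rollno in dict.keys():
--             dict[rollno].append((ccode,grade))
--         else:
--             dict[rollno] = [(ccode,grade)]
--
--     return(dict)
-- ===== SOURCE B (Python) =====
-- def setup_gradedict(details):
--     # Two-pass: collect distinct rollnos in first-occurrence order, then one
--     # comprehension per rollno gathering its (ccode, grade) pairs.
--     keys = []
--     for (r, _c, _g) in details: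
--         if r not in keys:
--             keys.append(r)
--     return {r: [(c, g) for (rr, c, g) in details if rr == r] for r in keys}
-- ===== Notes on version B (the rewrite author's own statement) =====
-- stated objective: alternative
-- what changed: Replaces the single-pass dict-building loop with a two-pass scheme: first collect the distinct rollnos in first-occurrence order, then build the dict with one comprehension per rollno filtering the whole list.
import Mathlib
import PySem

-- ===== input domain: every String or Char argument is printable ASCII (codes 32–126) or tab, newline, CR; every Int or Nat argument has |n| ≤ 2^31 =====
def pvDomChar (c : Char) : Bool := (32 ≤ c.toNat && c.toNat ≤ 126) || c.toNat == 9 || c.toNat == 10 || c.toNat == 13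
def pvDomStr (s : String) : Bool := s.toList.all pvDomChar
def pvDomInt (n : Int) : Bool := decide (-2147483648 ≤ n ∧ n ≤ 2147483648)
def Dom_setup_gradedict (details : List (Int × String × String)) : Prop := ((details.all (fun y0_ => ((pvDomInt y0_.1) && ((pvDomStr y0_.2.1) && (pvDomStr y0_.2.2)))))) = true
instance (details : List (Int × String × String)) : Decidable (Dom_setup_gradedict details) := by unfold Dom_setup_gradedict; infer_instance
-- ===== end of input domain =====

-- B replaces A's single-pass dict-building loop by a two-pass scheme (distinct
-- keys first, then one filter per key); alternative decomposition, not faster.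


-- ===== PORT A =====
def setup_gradedict (details : List (Int × String × String)) : List (Int × List (String × String)) :=
  (details.foldl (fun d t =>
      if d.contains t.1 then d.modify t.1 [] (fun l => l ++ [(t.2.1, t.2.2)])
      else d.insert t.1 [(t.2.1, t.2.2)])
    PySem.Dict.empty).items

-- ===== PORT B =====
def setup_gradedict_alt (details : List (Int × String × String)) : List (Int × List (String × String)) :=
  let keys := details.foldl (fun ks t => if t.1 ∈ ks then ks else ks ++ [t.1]) []
  keys.map (fun r => (r, (details.filter (fun t => t.1 == r)).map (fun t => (t.2.1, t.2.2))))

-- ===== PRECONDITION & SPEC =====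
def Spec_setup_gradedict (details : List (Int × String × String)) (out : List (Int × List (String × String))) : Prop := out = setup_gradedict_alt details
instance (details : List (Int × String × String)) (out : List (Int × List (String × String))) : Decidable (Spec_setup_gradedict details out) := by unfold Spec_setup_gradedict; infer_instance

-- ===== CLAIM (what is proved, stated in full; the proofs are below) =====
def Claim_equal_setup_gradedict : Prop := ∀ (details : List (Int × String × String)), Dom_setup_gradedict details → Spec_setup_gradedict details (setup_gradedict details)

-- ===== LEMMAS AND PROOFS =====

-- A's loop body equals an unconditional modify (on an absent key, modify appends f [])
theorem step_eq_modify (d : PySem.Dict Int (List (String × String))) (t : Int × String × String) :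
    (if d.contains t.1 then d.modify t.1 [] (fun l => l ++ [(t.2.1, t.2.2)])
     else d.insert t.1 [(t.2.1, t.2.2)]) = d.modify t.1 [] (fun l => l ++ [(t.2.1, t.2.2)]) := by
  by_cases h : d.contains t.1 = true
  · simp [h]
  · have hf : d.contains t.1 = false := by simpa using h
    simp only [hf, Bool.false_eq_true, if_false, PySem.Dict.modify]
    rw [PySem.Dict.getD_of_not_contains _ _ hf]
    simp

-- A's whole loop, rewritten over the (rollno, (ccode, grade)) pairs
theorem foldA_eq (details : List (Int × String × String)) :
    details.foldl (fun d t =>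
      if d.contains t.1 then d.modify t.1 [] (fun l => l ++ [(t.2.1, t.2.2)])
      else d.insert t.1 [(t.2.1, t.2.2)]) PySem.Dict.empty
    = (details.map (fun t => (t.1, (t.2.1, t.2.2)))).foldl
        (fun d p => d.modify p.1 [] (fun l => l ++ [p.2])) PySem.Dict.empty := by
  rw [List.foldl_map]
  exact PySem.List.foldl_congr_mem _ _ _ _ (fun acc x _ => step_eq_modify acc x)

theorem setup_gradedict_spec : Claim_equal_setup_gradedict := by
  intro details _
  show setup_gradedict details = setup_gradedict_alt details
  unfold setup_gradedict setup_gradedict_alt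
  rw [foldA_eq]
  set D := (details.map (fun t => (t.1, (t.2.1, t.2.2)))).foldl
      (fun d p => d.modify p.1 [] (fun l => l ++ [p.2])) PySem.Dict.empty with hD
  -- B's first pass is set-of-keys accumulation
  have hkeysB : details.foldl (fun ks t => if t.1 ∈ ks then ks else ks ++ [t.1]) []
      = PySem.Set.update ([] : PySem.Set Int) (details.map (fun t => t.1)) := by
    rw [PySem.Set.update_map_eq_foldl_add]
    exact (PySem.List.foldl_congr_mem _ _ _ _
      (fun acc x _ => PySem.Set.add_eq_ite acc x.1)).symm
  -- D's keys are the same set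
  have hkeysD : D.keys = PySem.Set.update ([] : PySem.Set Int) (details.map (fun t => t.1)) := by
    rw [hD, PySem.Dict.keys_foldl_modify_key, PySem.Dict.keys_empty, List.map_map]
    rfl
  have hnd : D.keys.Nodup := by
    rw [hD]
    exact PySem.Dict.nodup_keys_foldl_modify_key _ _ _ _ _ PySem.Dict.nodup_keys_empty
  rw [PySem.Dict.items_eq_map_keys D hnd [], hkeysB, hkeysD]
  refine List.map_congr_left (fun r _ => ?_)
  rw [hD, PySem.Dict.getD_foldl_modify_append, PySem.Dict.getD_empty]
  simp
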